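-- pv_equiv track=rewrite | github.com/liem18112000-axon/luz-skills-plugin | skills/prompt/prompt-compress/scripts/protect.py | _idx_to_label
-- ===== SOURCE A (Python) =====
-- _MAX_INDEX = 26 * 25 * 24 * 23  # 358,800
--
-- def _idx_to_label(i: int) -> str:
--     if i < 0 or i >= _MAX_INDEX:
--         raise ValueError(f"placeholder index {i} out of range (0..{_MAX_INDEX - 1})")
--     available = list(range(26))
--     chars: list[str] = []
--     for base in (26, 25, 24, 23):
--         d = i % base
--         i //= base
--         chars.append(chr(ord("A") + available.pop(d)))
--     return "".join(chars)
-- ===== SOURCE B (Python) =====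
-- _MAX_INDEX = 26 * 25 * 24 * 23  # 358,800
--
-- def _idx_to_label(i: int) -> str:
--     if i < 0 or i >= _MAX_INDEX:
--         raise ValueError(f"placeholder index {i} out of range (0..{_MAX_INDEX - 1})")
--     # pass 1: factorial-number-system digits
--     digits = []
--     for base in (26, 25, 24, 23):
--         digits.append(i % base)
--         i //= base
--     # pass 2: Lehmer-code decoding by arithmetic adjustment (no list of remaining
--     # letters): the d-th unused letter index is d bumped once for every previously
--     # chosen index <= it, scanning the chosen indices in increasing order.
--     chosen: list[int] = []
--     for d in digits:
--         v = d
--         for c in sorted(chosen):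
--             if c <= v:
--                 v += 1
--         chosen.append(v)
--     return "".join(chr(ord("A") + v) for v in chosen)
-- ===== Notes on version B (the rewrite author's own statement) =====
-- stated objective: alternative
-- what changed: Replaces the shrinking available-list with pop(d) by a two-pass Lehmer-code decode: first extract all four mixed-radix digits, then turn each digit into a letter index purely arithmetically, bumping it once for every previously chosen index <= it (scanned in increasing order), with no list of remaining letters at all.
import Mathlib
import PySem

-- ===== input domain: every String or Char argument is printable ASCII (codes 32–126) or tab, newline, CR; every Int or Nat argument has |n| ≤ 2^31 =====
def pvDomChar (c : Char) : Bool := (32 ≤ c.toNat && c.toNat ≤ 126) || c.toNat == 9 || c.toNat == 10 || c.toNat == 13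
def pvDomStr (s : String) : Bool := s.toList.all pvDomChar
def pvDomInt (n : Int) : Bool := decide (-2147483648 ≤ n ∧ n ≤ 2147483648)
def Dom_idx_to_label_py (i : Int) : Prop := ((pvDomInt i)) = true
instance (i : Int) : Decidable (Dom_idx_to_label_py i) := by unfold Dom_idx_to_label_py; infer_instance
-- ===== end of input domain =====

-- B replaces A's shrinking available-list with pop(d) by a two-pass Lehmer-code decode:
-- extract the four mixed-radix digits first, then turn each digit into a letter index
-- arithmetically (bump it once per previously chosen index ≤ it, scanned in increasing
-- order) — no list of remaining letters is kept (objective: alternative, same cost).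

-- ===== PORT A =====
-- one iteration of A's loop over (26,25,24,23); state = (i, available, chars); d = i % base
def pvStepA (s : Int × List Int × List Char) (base : Int) : Int × List Int × List Char :=
  match PySem.List.pop? s.2.1 (PySem.Int.mod s.1 base) with
  | some (c, rest) => (PySem.Int.floordiv s.1 base, rest, s.2.2 ++ [Char.ofNat (65 + c.toNat)])
  | none => (PySem.Int.floordiv s.1 base, s.2.1, s.2.2)   -- Python raises IndexError here; unreachable under Pre_

def idx_to_label_py (i : Int) : String :=
  if i < 0 ∨ 358800 ≤ i then ""   -- Python raises ValueError; excluded by Pre_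
  else
    let st := [(26 : Int), 25, 24, 23].foldl pvStepA (i, PySem.List.pyRange 0 26 1, ([] : List Char))
    String.ofList st.2.2

-- ===== PORT B =====
-- inner 'for c in sorted(chosen): if c <= v: v += 1'
def pvAdjust (v : Int) (s : List Int) : Int :=
  match s with
  | [] => v
  | c :: rest => if c ≤ v then pvAdjust (v + 1) rest else pvAdjust v rest

def idx_to_label_py_alt (i : Int) : String :=
  if i < 0 ∨ 358800 ≤ i then ""   -- same ValueError check as A; excluded by Pre_
  else
    -- pass 1: digits
    let digits := ([(26 : Int), 25, 24, 23].foldl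
      (fun (s : Int × List Int) base =>
        (PySem.Int.floordiv s.1 base, s.2 ++ [PySem.Int.mod s.1 base])) (i, [])).2
    -- pass 2: arithmetic Lehmer decode
    let chosen := digits.foldl
      (fun (ch : List Int) d => ch ++ [pvAdjust d (PySem.List.sorted ch (fun x => x) false)]) []
    String.ofList (chosen.map (fun v => Char.ofNat (65 + v.toNat)))

-- ===== PRECONDITION & SPEC =====
-- Pre_ excludes exactly the indices on which A raises ValueError (i < 0 or i ≥ 26*25*24*23).
def Pre_idx_to_label_py (i : Int) : Prop := 0 ≤ i ∧ i < 358800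
instance (i : Int) : Decidable (Pre_idx_to_label_py i) := by unfold Pre_idx_to_label_py; infer_instance
def pvWitness_idx_to_label_py : Int := (12345)

def Spec_idx_to_label_py (i : Int) (out : String) : Prop := out = idx_to_label_py_alt i
instance (i : Int) (out : String) : Decidable (Spec_idx_to_label_py i out) := by unfold Spec_idx_to_label_py; infer_instance

-- ===== CLAIM (what is proved, stated in full; the proofs are below) =====
def Claim_equal_idx_to_label_py : Prop := ∀ (i : Int), Dom_idx_to_label_py i → Pre_idx_to_label_py i → Spec_idx_to_label_py i (idx_to_label_py i)

-- ===== LEMMAS AND PROOFS =====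

-- erasing the n-th element of a duplicate-free list is filtering out that element
theorem pv_eraseIdx_eq_filter (l : List Int) (n : Nat) (hn : n < l.length) (hnd : l.Nodup) :
    l.eraseIdx n = l.filter (fun x => x != l[n]) := by
  induction l generalizing n with
  | nil => simp at hn
  | cons a t ih =>
    rcases List.nodup_cons.mp hnd with ⟨ha, hndt⟩
    cases n with
    | zero =>
      simp only [List.eraseIdx_zero, List.getElem_cons_zero, List.tail_cons, List.filter_cons]
      have : (a != a) = false := by simp
      rw [this, if_neg (by simp)]
      symm
      refine List.filter_eq_self.mpr ?_
      intro x hx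
      simp only [bne_iff_ne, ne_eq]
      exact fun hxa => ha (hxa ▸ hx)
    | succ m =>
      have hm : m < t.length := by simpa using hn
      have hat : (a != t[m]) = true := by
        simp only [bne_iff_ne, ne_eq]
        exact fun h => ha (h ▸ t.getElem_mem hm)
      simp only [List.eraseIdx_cons_succ, List.getElem_cons_succ, List.filter_cons, hat]
      simp [ih m hm hndt]

-- the d-th element of range(n) minus a strictly increasing list s is pvAdjust d s
theorem pvAdjust_get (n : Int) (s : List Int) (hs : s.Pairwise (· < ·))
    (hmem : ∀ c ∈ s, 0 ≤ c ∧ c < n) (d : Int) (hd : 0 ≤ d)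
    (hlt : d.toNat < ((PySem.List.pyRange 0 n 1).filter (fun x => !(s.contains x))).length) :
    ((PySem.List.pyRange 0 n 1).filter (fun x => !(s.contains x)))[d.toNat]? = some (pvAdjust d s) := by
  induction s generalizing d with
  | nil =>
    simp only [List.contains_nil, Bool.not_false, List.filter_true] at hlt ⊢
    rw [PySem.List.length_pyRange_one] at hlt
    rw [PySem.List.getElem?_pyRange_one, if_pos hlt]
    simp only [pvAdjust, zero_add, Option.some.injEq]
    omega
  | cons c s' ih =>
    rcases List.pairwise_cons.mp hs with ⟨hcs, hs'⟩
    have hc := hmem c (by simp)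
    have hmem' : ∀ x ∈ s', 0 ≤ x ∧ x < n := fun x hx => hmem x (by simp [hx])
    set F' := (PySem.List.pyRange 0 n 1).filter (fun x => !(s'.contains x)) with hF'
    -- the filter by c::s' is the filter by s' with c removed
    have hsplit : (PySem.List.pyRange 0 n 1).filter (fun x => !((c :: s').contains x))
        = F'.filter (fun x => x != c) := by
      rw [hF', List.filter_filter]
      refine List.filter_congr ?_
      intro x _
      simp only [List.contains_cons]
      cases hxc : x == c <;> cases hxs : s'.contains x <;> simp [bne, hxc]
    -- F' at index c.toNat is c
    have hcge : F'[c.toNat]? = some c := by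
      have happ : PySem.List.pyRange 0 n 1
          = PySem.List.pyRange 0 (c + 1) 1 ++ PySem.List.pyRange (c + 1) n 1 :=
        PySem.List.pyRange_one_append 0 (c + 1) n (by omega) (by omega)
      have hpre : (PySem.List.pyRange 0 (c + 1) 1).filter (fun x => !(s'.contains x))
          = PySem.List.pyRange 0 (c + 1) 1 := by
        refine List.filter_eq_self.mpr ?_
        intro x hx
        rcases (PySem.List.mem_pyRange_one).mp hx with ⟨hx0, hx1⟩
        have : x ∉ s' := by
          intro hxs
          have := hcs x hxs
          omega
        simpa using this
      rw [hF', happ, List.filter_append, hpre]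
      have hlen : (PySem.List.pyRange 0 (c + 1) 1).length = c.toNat + 1 := by
        rw [PySem.List.length_pyRange_one]; omega
      rw [List.getElem?_append_left (by omega)]
      have hc' : (0 : Int) + (c.toNat : Int) = c := by omega
      rw [PySem.List.getElem?_pyRange_one, if_pos (by omega), hc']
    have hclen : c.toNat < F'.length := by
      have := List.getElem?_eq_some_iff.mp hcge
      exact this.1
    have hcval : F'[c.toNat] = c := by
      have := List.getElem?_eq_some_iff.mp hcge
      rcases this with ⟨h1, h2⟩; exact h2
    have hFnd : F'.Nodup := ((PySem.List.nodup_pyRange_one 0 n).filter _)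
    have herase : (PySem.List.pyRange 0 n 1).filter (fun x => !((c :: s').contains x))
        = F'.eraseIdx c.toNat := by
      rw [hsplit, pv_eraseIdx_eq_filter F' c.toNat hclen hFnd, hcval]
    rw [herase] at hlt ⊢
    have hlenE : (F'.eraseIdx c.toNat).length = F'.length - 1 :=
      List.length_eraseIdx_of_lt hclen
    rw [List.getElem?_eraseIdx]
    by_cases hdc : c ≤ d
    · have hnotlt : ¬ d.toNat < c.toNat := by omega
      rw [if_neg hnotlt]
      have h1 : d.toNat + 1 = (d + 1).toNat := by omega
      rw [h1]
      have hb : (d + 1).toNat < F'.length := by omega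
      rw [ih hs' hmem' (d + 1) (by omega) hb]
      simp [pvAdjust, hdc]
    · have hlt' : d.toNat < c.toNat := by omega
      rw [if_pos hlt']
      have hb : d.toNat < F'.length := by omega
      rw [ih hs' hmem' d hd hb]
      simp [pvAdjust, hdc]

-- one synchronized step: A's available list is range(26) minus B's chosen indices,
-- and the letter A pops equals B's arithmetically adjusted digit
theorem pvSel_step (iv base : Int) (chosen : List Int) (hb : 0 < base)
    (hnd : chosen.Nodup) (hmem : ∀ x ∈ chosen, 0 ≤ x ∧ x < 26)
    (hlen : ((PySem.List.pyRange 0 26 1).filter (fun x => !(chosen.contains x))).length = base.toNat) :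
    pvStepA (iv, (PySem.List.pyRange 0 26 1).filter (fun x => !(chosen.contains x)),
             chosen.map (fun v => Char.ofNat (65 + v.toNat))) base
      = (PySem.Int.floordiv iv base,
         (PySem.List.pyRange 0 26 1).filter (fun x =>
           !((chosen ++ [pvAdjust (PySem.Int.mod iv base) (PySem.List.sorted chosen (fun x => x) false)]).contains x)),
         ((chosen ++ [pvAdjust (PySem.Int.mod iv base) (PySem.List.sorted chosen (fun x => x) false)]).map
           (fun v => Char.ofNat (65 + v.toNat))))
    ∧ (chosen ++ [pvAdjust (PySem.Int.mod iv base) (PySem.List.sorted chosen (fun x => x) false)]).Nodup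
    ∧ (∀ x ∈ chosen ++ [pvAdjust (PySem.Int.mod iv base) (PySem.List.sorted chosen (fun x => x) false)], 0 ≤ x ∧ x < 26)
    ∧ ((PySem.List.pyRange 0 26 1).filter (fun x =>
         !((chosen ++ [pvAdjust (PySem.Int.mod iv base) (PySem.List.sorted chosen (fun x => x) false)]).contains x))).length
        = base.toNat - 1 := by
  set d := PySem.Int.mod iv base with hdd
  set S := PySem.List.sorted chosen (fun x => x) false with hS
  set v := pvAdjust d S with hv
  set F := (PySem.List.pyRange 0 26 1).filter (fun x => !(chosen.contains x)) with hF
  have hd0 : 0 ≤ d := PySem.Int.mod_nonneg iv hb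
  have hdlt : d < base := PySem.Int.mod_lt iv hb
  -- the sorted copy: same members, strictly increasing
  have hperm : S.Perm chosen := PySem.List.sorted_perm chosen _ _
  have hSnd : S.Nodup := hperm.nodup_iff.mpr hnd
  have hSle : S.Pairwise (fun a b => a ≤ b) := PySem.List.sorted_pairwise chosen _
  have hSlt : S.Pairwise (· < ·) := by
    refine (List.Pairwise.and hSle hSnd).imp ?_
    rintro a b ⟨h1, h2⟩; exact lt_of_le_of_ne h1 h2
  have hSmem : ∀ x ∈ S, 0 ≤ x ∧ x < 26 := fun x hx => hmem x (hperm.mem_iff.mp hx)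
  have hFS : F = (PySem.List.pyRange 0 26 1).filter (fun x => !(S.contains x)) := by
    rw [hF]
    refine List.filter_congr ?_
    intro x _
    have : S.contains x = chosen.contains x := by
      rw [Bool.eq_iff_iff, List.contains_iff_mem, List.contains_iff_mem]
      exact hperm.mem_iff
    rw [this]
  have hdn : d.toNat < F.length := by omega
  have hget : F[d.toNat]? = some v := by
    rw [hFS]
    rw [hFS] at hdn
    exact pvAdjust_get 26 S hSlt hSmem d hd0 hdn
  have hgetE : F[d.toNat] = v := (List.getElem?_eq_some_iff.mp hget).2
  have hcast : d = ((d.toNat : Nat) : Int) := by omega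
  have hpop : PySem.List.pop? F d = some (F[d.toNat], F.eraseIdx d.toNat) := by
    have h := PySem.List.pop?_natCast F d.toNat hdn
    rw [← hcast] at h
    exact h
  have hFnd : F.Nodup := ((PySem.List.nodup_pyRange_one 0 26).filter _)
  have hvF : v ∈ F := by rw [← hgetE]; exact F.getElem_mem hdn
  have hvrange : 0 ≤ v ∧ v < 26 := by
    have := List.mem_filter.mp (hF ▸ hvF)
    exact (PySem.List.mem_pyRange_one).mp this.1
  have hvnot : v ∉ chosen := by
    have := List.mem_filter.mp (hF ▸ hvF)
    simpa [List.contains_iff_mem] using this.2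
  have hfiltnew : (PySem.List.pyRange 0 26 1).filter (fun x => !((chosen ++ [v]).contains x))
      = F.eraseIdx d.toNat := by
    rw [pv_eraseIdx_eq_filter F d.toNat hdn hFnd, hgetE, hF, List.filter_filter]
    refine List.filter_congr ?_
    intro x _
    simp only [List.contains_append, List.contains_cons, List.contains_nil]
    cases h1 : chosen.contains x <;> cases h2 : x == v <;> simp [bne, h2]
  refine ⟨?_, ?_, ?_, ?_⟩
  · simp only [pvStepA, ← hdd, hpop, hgetE, ← hfiltnew, List.map_append]
    simp
  · refine List.Nodup.append hnd (List.nodup_singleton _) ?_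
    intro a ha hb
    simp only [List.mem_singleton] at hb
    exact hvnot (hb ▸ ha)
  · intro x hx
    rcases List.mem_append.mp hx with h | h
    · exact hmem x h
    · simp at h; omega
  · rw [hfiltnew, List.length_eraseIdx_of_lt hdn, hlen]

-- ===== VERDICT (by name: the statement is the Claim_ definition above) =====
theorem idx_to_label_py_spec : Claim_equal_idx_to_label_py := by
  intro i _ hpre
  unfold Spec_idx_to_label_py idx_to_label_py idx_to_label_py_alt
  rcases hpre with ⟨h0, h1⟩
  rw [if_neg (by omega), if_neg (by omega)]
  simp only [List.foldl_append, List.foldl]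
  have hinit : PySem.List.pyRange 0 26 1
      = (PySem.List.pyRange 0 26 1).filter (fun x => !(([] : List Int).contains x)) := by simp
  have hlen0 : ((PySem.List.pyRange 0 26 1).filter (fun x => !(([] : List Int).contains x))).length
      = (26 : Int).toNat := by simp [PySem.List.length_pyRange_one]
  have hmem0 : ∀ x ∈ ([] : List Int), 0 ≤ x ∧ x < 26 := by simp
  obtain ⟨e1, n1, m1, l1⟩ := pvSel_step i 26 [] (by norm_num) (by simp) hmem0 hlen0
  set c1 := [] ++ [pvAdjust (PySem.Int.mod i 26) (PySem.List.sorted [] (fun x => x) false)] with hc1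
  obtain ⟨e2, n2, m2, l2⟩ := pvSel_step (PySem.Int.floordiv i 26) 25 c1 (by norm_num) n1 m1 (by rw [l1]; decide)
  set c2 := c1 ++ [pvAdjust (PySem.Int.mod (PySem.Int.floordiv i 26) 25) (PySem.List.sorted c1 (fun x => x) false)] with hc2
  obtain ⟨e3, n3, m3, l3⟩ := pvSel_step (PySem.Int.floordiv (PySem.Int.floordiv i 26) 25) 24 c2 (by norm_num) n2 m2 (by rw [l2]; decide)
  set c3 := c2 ++ [pvAdjust (PySem.Int.mod (PySem.Int.floordiv (PySem.Int.floordiv i 26) 25) 24) (PySem.List.sorted c2 (fun x => x) false)] with hc3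
  obtain ⟨e4, _, _, _⟩ := pvSel_step (PySem.Int.floordiv (PySem.Int.floordiv (PySem.Int.floordiv i 26) 25) 24) 23 c3 (by norm_num) n3 m3 (by rw [l3]; decide)
  have hmap0 : ([] : List Char) = ([] : List Int).map (fun v => Char.ofNat (65 + v.toNat)) := rfl
  rw [hinit, hmap0, e1, e2, e3, e4]
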